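-- pv_equiv track=rewrite | github.com/olizhu10/newsroom | scripts/metric_analysis.py | find_pos_neg
-- ===== SOURCE A (Python) =====
-- def find_pos_neg(pos_matrix, threshold_matrix):
--     """Returns the number of true positives, false positives, true negatives, and false negatives."""
--
--     TP = 0
--     FP = 0
--     TN = 0
--     FN = 0
--
--     for x in range(len(pos_matrix)):
--         for y in range(len(pos_matrix)):
--             true_value = pos_matrix[x][y]
--             if true_value == threshold_matrix[x][y]:
--                 if true_value == 1:
--                     TP += 1
--                 else:
--                     TN += 1
--             else:
--                 if true_value == 0:
--                     FP += 1
--                 else: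
--                     FN += 1
--
--     return TP, FP, TN, FN
-- ===== SOURCE B (Python) =====
-- def find_pos_neg(pos_matrix, threshold_matrix):
--     """Returns the number of true positives, false positives, true negatives, and false negatives."""
--     n = len(pos_matrix)
--     pairs = [(pos_matrix[x][y], threshold_matrix[x][y]) for x in range(n) for y in range(n)]
--     TP = sum(1 for t, p in pairs if t == 1 and p == 1)
--     FP = sum(1 for t, p in pairs if t == 0 and p != 0)
--     matches = sum(1 for t, p in pairs if t == p)
--     return TP, FP, matches - TP, n * n - matches - FP
-- ===== Notes on version B (the rewrite author's own statement) =====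
-- stated objective: alternative
-- what changed: B never classifies a cell into four cases: it flattens the grid into a pairs list, counts only TP, FP and the number of matching cells, and derives TN = matches - TP and FN = n*n - matches - FP arithmetically from those totals.
import Mathlib
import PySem

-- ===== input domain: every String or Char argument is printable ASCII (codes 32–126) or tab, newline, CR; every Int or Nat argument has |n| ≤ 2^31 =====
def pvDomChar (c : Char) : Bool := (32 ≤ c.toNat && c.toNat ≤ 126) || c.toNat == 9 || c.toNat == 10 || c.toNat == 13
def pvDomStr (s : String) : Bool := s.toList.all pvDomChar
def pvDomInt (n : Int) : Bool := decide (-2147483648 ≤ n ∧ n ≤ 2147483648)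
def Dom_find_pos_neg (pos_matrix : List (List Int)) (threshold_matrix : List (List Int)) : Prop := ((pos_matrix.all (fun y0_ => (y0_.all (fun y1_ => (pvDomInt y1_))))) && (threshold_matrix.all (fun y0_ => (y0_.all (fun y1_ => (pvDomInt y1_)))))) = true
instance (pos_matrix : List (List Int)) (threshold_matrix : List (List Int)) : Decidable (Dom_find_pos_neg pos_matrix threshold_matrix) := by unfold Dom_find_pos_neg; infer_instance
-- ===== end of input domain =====

-- B replaces A's four-way in-loop classification by counting only TP, FP and the matching
-- cells over a flattened pairs list and deriving TN and FN arithmetically; same cost,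
-- different decomposition.

-- ===== PORT A =====
-- literal transliteration of A: nested range(len(pos_matrix)) loops updating four counters
def find_pos_neg (pos_matrix : List (List Int)) (threshold_matrix : List (List Int)) : Int × Int × Int × Int :=
  (PySem.List.pyRange 0 (PySem.List.len pos_matrix) 1).foldl (fun st x =>
    (PySem.List.pyRange 0 (PySem.List.len pos_matrix) 1).foldl
      (fun (st : Int × Int × Int × Int) y =>
        let true_value := PySem.List.pyGetD (PySem.List.pyGetD pos_matrix x []) y 0
        if true_value == PySem.List.pyGetD (PySem.List.pyGetD threshold_matrix x []) y 0 then
          if true_value == 1 then (st.1 + 1, st.2.1, st.2.2.1, st.2.2.2)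
          else (st.1, st.2.1, st.2.2.1 + 1, st.2.2.2)
        else
          if true_value == 0 then (st.1, st.2.1 + 1, st.2.2.1, st.2.2.2)
          else (st.1, st.2.1, st.2.2.1, st.2.2.2 + 1)) st)
    ((0, 0, 0, 0) : Int × Int × Int × Int)

-- ===== PORT B =====
-- literal transliteration of Source B: flatten to a pairs list, count TP / FP / matches
-- (sum(1 for … if pred) is ported as List.countP), derive TN and FN arithmetically
def find_pos_neg_alt (pos_matrix : List (List Int)) (threshold_matrix : List (List Int)) : Int × Int × Int × Int :=
  let n := PySem.List.len pos_matrix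
  let pairs := (PySem.List.pyRange 0 n 1).flatMap (fun x =>
    (PySem.List.pyRange 0 n 1).map (fun y =>
      (PySem.List.pyGetD (PySem.List.pyGetD pos_matrix x []) y 0,
       PySem.List.pyGetD (PySem.List.pyGetD threshold_matrix x []) y 0)))
  let TP : Int := (pairs.countP (fun tp => tp.1 == 1 && tp.2 == 1) : Int)
  let FP : Int := (pairs.countP (fun tp => tp.1 == 0 && tp.2 != 0) : Int)
  let matched : Int := (pairs.countP (fun tp => tp.1 == tp.2) : Int)
  (TP, FP, matched - TP, n * n - matched - FP)

-- ===== PRECONDITION & SPEC =====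
-- Pre_ excludes exactly the inputs where A raises IndexError: threshold_matrix, one of its
-- first len(pos_matrix) rows, or some row of pos_matrix is shorter than len(pos_matrix).
def Pre_find_pos_neg (pos_matrix : List (List Int)) (threshold_matrix : List (List Int)) : Prop :=
  pos_matrix.length ≤ threshold_matrix.length ∧
  (∀ r ∈ pos_matrix, pos_matrix.length ≤ r.length) ∧
  (∀ r ∈ threshold_matrix.take pos_matrix.length, pos_matrix.length ≤ r.length)
instance (pos_matrix : List (List Int)) (threshold_matrix : List (List Int)) : Decidable (Pre_find_pos_neg pos_matrix threshold_matrix) := by unfold Pre_find_pos_neg; infer_instance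

def pvWitness_find_pos_neg : List (List Int) × List (List Int) :=
  ([[1, 0], [0, 1]], [[1, 1], [0, 0]])

def Spec_find_pos_neg (pos_matrix : List (List Int)) (threshold_matrix : List (List Int)) (out : Int × Int × Int × Int) : Prop := out = find_pos_neg_alt pos_matrix threshold_matrix
instance (pos_matrix : List (List Int)) (threshold_matrix : List (List Int)) (out : Int × Int × Int × Int) : Decidable (Spec_find_pos_neg pos_matrix threshold_matrix out) := by unfold Spec_find_pos_neg; infer_instance

-- ===== CLAIM (what is proved, stated in full; the proofs are below) =====
def Claim_equal_find_pos_neg : Prop := ∀ (pos_matrix : List (List Int)) (threshold_matrix : List (List Int)), Dom_find_pos_neg pos_matrix threshold_matrix → Pre_find_pos_neg pos_matrix threshold_matrix → Spec_find_pos_neg pos_matrix threshold_matrix (find_pos_neg pos_matrix threshold_matrix)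

-- ===== LEMMAS AND PROOFS =====

-- the flattened list of (actual, predicted) pairs both programs traverse
def pvPairs (pos_matrix : List (List Int)) (threshold_matrix : List (List Int)) : List (Int × Int) :=
  (List.range pos_matrix.length).flatMap (fun (x : Nat) =>
    (List.range pos_matrix.length).map (fun (y : Nat) =>
      (PySem.List.pyGetD (PySem.List.pyGetD pos_matrix (x : Int) []) (y : Int) 0,
       PySem.List.pyGetD (PySem.List.pyGetD threshold_matrix (x : Int) []) (y : Int) 0)))

-- A's loop body as a function of the (actual, predicted) pair
def pvStep (st : Int × Int × Int × Int) (p : Int × Int) : Int × Int × Int × Int :=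
  if p.1 == p.2 then
    if p.1 == 1 then (st.1 + 1, st.2.1, st.2.2.1, st.2.2.2)
    else (st.1, st.2.1, st.2.2.1 + 1, st.2.2.2)
  else
    if p.1 == 0 then (st.1, st.2.1 + 1, st.2.2.1, st.2.2.2)
    else (st.1, st.2.1, st.2.2.1, st.2.2.2 + 1)

def pvTP (p : Int × Int) : Bool := p.1 == p.2 && p.1 == 1
def pvFP (p : Int × Int) : Bool := p.1 != p.2 && p.1 == 0
def pvTN (p : Int × Int) : Bool := p.1 == p.2 && p.1 != 1
def pvFN (p : Int × Int) : Bool := p.1 != p.2 && p.1 != 0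

lemma pvStep_foldl (P : List (Int × Int)) (st : Int × Int × Int × Int) :
    P.foldl pvStep st =
      (st.1 + (P.countP pvTP : Int), st.2.1 + (P.countP pvFP : Int),
       st.2.2.1 + (P.countP pvTN : Int), st.2.2.2 + (P.countP pvFN : Int)) := by
  induction P generalizing st with
  | nil => simp
  | cons a P ih =>
    rcases st with ⟨t, f, n, m⟩
    rcases a with ⟨u, v⟩
    rw [List.foldl_cons, ih]
    by_cases h1 : u = v <;> by_cases h2 : u = (1 : Int) <;> by_cases h3 : u = (0 : Int) <;>
      simp_all [pvStep, pvTP, pvFP, pvTN, pvFN, Prod.ext_iff] <;> omega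

lemma pvRange_len_eq (pos_matrix : List (List Int)) :
    PySem.List.pyRange 0 (PySem.List.len pos_matrix) 1
      = List.map (fun k : Nat => (k : Int)) (List.range pos_matrix.length) := by
  rw [PySem.List.len_eq]; exact PySem.List.pyRange_zero_natCast _

lemma A_eq (pos_matrix threshold_matrix : List (List Int)) :
    find_pos_neg pos_matrix threshold_matrix =
      List.foldl pvStep (0, 0, 0, 0) (pvPairs pos_matrix threshold_matrix) := by
  unfold find_pos_neg pvPairs
  rw [List.foldl_flatMap, pvRange_len_eq, List.foldl_map]
  refine PySem.List.foldl_congr_mem _ _ _ _ (fun acc x _ => ?_)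
  rw [List.foldl_map, List.foldl_map]
  rfl

-- B's flattened comprehension is the same pairs list
lemma B_pairs (pos_matrix threshold_matrix : List (List Int)) :
    ((PySem.List.pyRange 0 (PySem.List.len pos_matrix) 1).flatMap (fun x =>
      (PySem.List.pyRange 0 (PySem.List.len pos_matrix) 1).map (fun y =>
        (PySem.List.pyGetD (PySem.List.pyGetD pos_matrix x []) y 0,
         PySem.List.pyGetD (PySem.List.pyGetD threshold_matrix x []) y 0)))) =
      pvPairs pos_matrix threshold_matrix := by
  unfold pvPairs
  rw [pvRange_len_eq, List.flatMap_map]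
  refine List.flatMap_congr (fun x _ => ?_)
  rw [List.map_map]
  rfl

lemma pvPairs_length (pos_matrix threshold_matrix : List (List Int)) :
    (pvPairs pos_matrix threshold_matrix).length = pos_matrix.length * pos_matrix.length := by
  simp [pvPairs, List.length_flatMap]

-- the three counted predicates rewritten to B's form
lemma count_TP (P : List (Int × Int)) :
    P.countP (fun tp => tp.1 == 1 && tp.2 == 1) = P.countP pvTP := by
  refine List.countP_congr (fun p _ => ?_)
  rcases p with ⟨u, v⟩
  by_cases h1 : u = (1 : Int) <;> by_cases h2 : v = (1 : Int) <;> simp_all [pvTP] <;> omega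
lemma count_FP (P : List (Int × Int)) :
    P.countP (fun tp => tp.1 == 0 && tp.2 != 0) = P.countP pvFP := by
  refine List.countP_congr (fun p _ => ?_)
  rcases p with ⟨u, v⟩
  by_cases h1 : u = (0 : Int) <;> by_cases h2 : v = (0 : Int) <;> simp_all [pvFP] <;> omega

-- splitting the matches / mismatches counts into A's four classes
lemma count_split_eq (P : List (Int × Int)) :
    P.countP (fun tp => tp.1 == tp.2) = P.countP pvTP + P.countP pvTN := by
  induction P with
  | nil => rfl
  | cons a P ih =>
    rcases a with ⟨u, v⟩
    by_cases h1 : u = v <;> by_cases h2 : u = (1 : Int) <;>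
      simp_all [pvTP, pvTN] <;> omega
lemma count_split_all (P : List (Int × Int)) :
    P.length = P.countP (fun tp => tp.1 == tp.2) + P.countP pvFP + P.countP pvFN := by
  induction P with
  | nil => rfl
  | cons a P ih =>
    rcases a with ⟨u, v⟩
    by_cases h1 : u = v <;> by_cases h2 : u = (0 : Int) <;>
      simp_all [pvFP, pvFN] <;> omega

lemma B_eq (pos_matrix threshold_matrix : List (List Int)) :
    find_pos_neg_alt pos_matrix threshold_matrix =
      (((pvPairs pos_matrix threshold_matrix).countP pvTP : Int),
       ((pvPairs pos_matrix threshold_matrix).countP pvFP : Int),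
       ((pvPairs pos_matrix threshold_matrix).countP pvTN : Int),
       ((pvPairs pos_matrix threshold_matrix).countP pvFN : Int)) := by
  unfold find_pos_neg_alt
  simp only [B_pairs, count_TP, count_FP]
  have hlen := pvPairs_length pos_matrix threshold_matrix
  have heq := count_split_eq (pvPairs pos_matrix threshold_matrix)
  have hall := count_split_all (pvPairs pos_matrix threshold_matrix)
  rw [PySem.List.len_eq]
  refine Prod.ext rfl (Prod.ext rfl (Prod.ext ?_ ?_))
  · push_cast [heq]; ring
  · push_cast [heq]
    rw [← Nat.cast_mul, ← hlen]
    omega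

-- ===== VERDICT (by name: the statement is the Claim_ definition above) =====
theorem find_pos_neg_spec : Claim_equal_find_pos_neg := by
  intro pos_matrix threshold_matrix _ _
  unfold Spec_find_pos_neg
  rw [A_eq, B_eq, pvStep_foldl]
  simp
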